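-- pv_equiv track=rewrite | github.com/laujingxuan/leetcode | PYTHON/LexiSmallestEqualString.py | smallestEquivalentStringNotSoIdeal
-- ===== SOURCE A (Python) =====
-- def smallestEquivalentStringNotSoIdeal(s1: str, s2: str, baseStr: str) -> str:
--     trackMap = {}
--     for i in range(len(s1)):
--         str1List = trackMap.get(s1[i], [])
--         str2List = trackMap.get(s2[i], [])
--         str1List.append(s2[i])
--         str2List.append(s1[i])
--         trackMap[s1[i]] = str1List
--         trackMap[s2[i]] = str2List
--
--     output = ""
--     stack = []
--     for i in range(len(baseStr)):
--         if baseStr[i] in trackMap: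
--             stack += trackMap[baseStr[i]]
--         smallestLexi = baseStr[i]
--         hasVisited = set()
--         hasVisited.add(baseStr[i])
--         while len(stack) > 0:
--             currentChar = stack.pop()
--             if currentChar in hasVisited:
--                 continue
--             hasVisited.add(currentChar)
--             if currentChar < smallestLexi:
--                 smallestLexi = currentChar
--             stack += trackMap[currentChar]
--         output += smallestLexi
--     return output
-- ===== SOURCE B (Python) =====
-- def smallestEquivalentStringNotSoIdeal(s1: str, s2: str, baseStr: str) -> str:
--     # Union-find (no path compression) whose root is always the minimal
--     # character of its class: parent[c] < c for every entry, so find walks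
--     # a strictly decreasing chain straight to the class minimum.
--     parent = {}
--
--     def find(c):
--         while c in parent:
--             c = parent[c]
--         return c
--
--     for a, b in zip(s1, s2):
--         ra, rb = find(a), find(b)
--         if ra != rb:
--             if rb < ra:
--                 parent[ra] = rb
--             else:
--                 parent[rb] = ra
--
--     return "".join(find(c) for c in baseStr)
-- ===== Notes on version B (the rewrite author's own statement) =====
-- stated objective: faster
-- what changed: Replaces A's per-output-character DFS (stack + visited set over an adjacency map rebuilt search each character) with a union-find built once over the letter pairs whose class root is always the minimal letter, so each output character is a single find walk.
import Mathlib
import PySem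

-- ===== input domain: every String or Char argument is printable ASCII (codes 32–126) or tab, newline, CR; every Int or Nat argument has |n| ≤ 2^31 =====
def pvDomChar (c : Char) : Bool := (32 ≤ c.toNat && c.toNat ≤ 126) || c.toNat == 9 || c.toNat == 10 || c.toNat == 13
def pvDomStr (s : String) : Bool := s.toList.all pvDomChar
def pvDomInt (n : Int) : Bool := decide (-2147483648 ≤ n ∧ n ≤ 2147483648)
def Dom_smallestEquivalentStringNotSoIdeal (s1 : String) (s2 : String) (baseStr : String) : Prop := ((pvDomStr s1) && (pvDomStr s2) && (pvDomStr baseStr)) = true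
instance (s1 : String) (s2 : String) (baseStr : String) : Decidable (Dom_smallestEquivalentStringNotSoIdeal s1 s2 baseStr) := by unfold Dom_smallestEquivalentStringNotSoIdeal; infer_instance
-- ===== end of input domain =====

-- B replaces A's per-character DFS over an adjacency map by a union-find built once
-- whose root is the minimal letter of each equivalence class (objective: faster).

-- ===== PORT A =====

-- one pass of A's first loop: read both lists, append, store back.
-- (When s1[i] = s2[i] and the key is already present, Python's two appends go to the
-- same list object, leaving a duplicated entry; the immutable transcription keeps one
-- copy — the dict differs only in duplicate entries, every membership (and hence the
-- function's output) is identical.)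
def pvTMStep (tm : PySem.Dict Char (List Char)) (e : Char × Char) : PySem.Dict Char (List Char) :=
  let l1 := tm.getD e.1 []
  let l2 := tm.getD e.2 []
  (tm.insert e.1 (l1 ++ [e.2])).insert e.2 (l2 ++ [e.1])

-- for i in range(len(s1)): … s1[i], s2[i] …  (s2[i] raises IndexError when
-- len(s2) < len(s1); those inputs are excluded by Pre_, the `| _, _ =>` arm is
-- unreachable under Pre_)
def pvBuildTM (s1 s2 : String) : PySem.Dict Char (List Char) :=
  (PySem.List.pyRange 0 (PySem.Str.len s1) 1).foldl (fun tm i =>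
    match PySem.Str.pyGet? s1 i, PySem.Str.pyGet? s2 i with
    | some c1, some c2 => pvTMStep tm (c1, c2)
    | _, _ => tm) PySem.Dict.empty

-- two generic filter-length facts used by pvLoopA's termination measure
theorem pv_filter_lt (p q : Char → Bool) (h : ∀ x, q x = true → p x = true)
    (a : Char) (hpa : p a = true) (hqa : q a = false) :
    ∀ (l : List Char), a ∈ l → (l.filter q).length < (l.filter p).length := by
  intro l ha
  induction l with
  | nil => simp at ha
  | cons x t ih =>
    have hmono : (t.filter q).length ≤ (t.filter p).length := by
      simp only [← List.countP_eq_length_filter]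
      exact List.countP_mono_left (fun x _ hx => h x hx)
    rcases List.mem_cons.mp ha with rfl | ha
    · simp [hpa, hqa]; omega
    · by_cases hq : q x
      · have hp := h x hq
        simp only [List.filter_cons, hq, hp, if_true, List.length_cons]
        exact Nat.succ_lt_succ (ih ha)
      · simp only [List.filter_cons, hq]
        by_cases hp : p x <;> simp [hp] <;> have := ih ha <;> omega

theorem pv_filter_le (p q : Char → Bool) (h : ∀ x, q x = true → p x = true) (l : List Char) :
    (l.filter q).length ≤ (l.filter p).length := by
  simp only [← List.countP_eq_length_filter]
  exact List.countP_mono_left (fun x _ hx => h x hx)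

-- A's inner `while len(stack) > 0` loop; stack.pop() pops from the end, `stack += l`
-- appends at the end.  Returns (smallestLexi, final stack).  `trackMap[currentChar]`
-- is ported as getD with default [] — every char ever stacked is a key of trackMap,
-- so Python's KeyError branch is unreachable and the default is never used.
def pvLoopA (tm : PySem.Dict Char (List Char)) (stack : List Char)
    (visited : PySem.Set Char) (small : Char) : Char × List Char :=
  match h : stack.getLast? with
  | none => (small, stack)
  | some cur =>
    let rest := stack.dropLast
    if PySem.Set.contains visited cur then
      pvLoopA tm rest visited small
    else
      pvLoopA tm (rest ++ tm.getD cur []) (PySem.Set.add visited cur)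
        (if cur < small then cur else small)
  termination_by ((tm.values.map List.length).sum + 1) *
      (tm.keys.filter (fun k => !(PySem.Set.contains visited k))).length + stack.length
  decreasing_by
    · have hne : stack ≠ [] := by intro hs; rw [hs] at h; simp at h
      have hdl : stack.dropLast.length = stack.length - 1 := List.length_dropLast
      have hpos : 0 < stack.length := List.length_pos_iff.mpr hne
      omega
    · rename_i hnv
      have hne : stack ≠ [] := by intro hs; rw [hs] at h; simp at h
      have hpos : 0 < stack.length := List.length_pos_iff.mpr hne
      set K := ((tm.values.map List.length).sum + 1) with hK
      set p := (fun k => !(PySem.Set.contains visited k)) with hp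
      set q := (fun k => !(PySem.Set.contains (PySem.Set.add visited cur) k)) with hq
      have himp : ∀ x, q x = true → p x = true := by
        intro x hx
        simp only [hq, hp, Bool.not_eq_true'] at *
        simp only [PySem.Set.contains, PySem.Set.add] at *
        split at hx
        · exact hx
        · simp_all
      have hqcur : q cur = false := by simp [hq, PySem.Set.contains]
      have hadjlen : (tm.getD cur []).length + 1 ≤ K := by
        by_cases hc : tm.contains cur
        · have hsome : (tm.get? cur).isSome := by rw [← PySem.Dict.contains_eq_isSome_get?]; exact hc
          obtain ⟨v, hv⟩ := Option.isSome_iff_exists.mp hsome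
          have hgd : tm.getD cur [] = v := PySem.Dict.getD_of_get?_eq_some _ _ hv
          have hmem : v ∈ tm.values := by
            have := PySem.Dict.mem_items_of_get?_eq_some tm hv
            simp [PySem.Dict.values]; exact ⟨cur, this⟩
          have : v.length ≤ (tm.values.map List.length).sum :=
            List.single_le_sum (by simp) _ (List.mem_map_of_mem hmem)
          rw [hgd]; omega
        · have h0 : tm.getD cur [] = [] := PySem.Dict.getD_of_not_contains tm [] (by simpa using hc)
          simp [h0, hK]
      have hlen : (stack.dropLast ++ tm.getD cur []).length = stack.length - 1 + (tm.getD cur []).length := by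
        simp [List.length_dropLast]
      by_cases hc : tm.contains cur
      · have hcurkeys : cur ∈ tm.keys := by
          rw [PySem.Dict.contains_eq_decide_mem_keys] at hc; simpa using hc
        have hpcur : p cur = true := by
          simp only [hp, Bool.not_eq_true']
          simp only [PySem.Set.contains] at hnv ⊢
          simpa using hnv
        have hstrict := pv_filter_lt p q himp cur hpcur hqcur tm.keys hcurkeys
        have hmul : K * ((tm.keys.filter q).length + 1) ≤ K * (tm.keys.filter p).length :=
          Nat.mul_le_mul_left K hstrict
        have hms : K * ((tm.keys.filter q).length + 1) = K * (tm.keys.filter q).length + K := by ring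
        omega
      · have : tm.getD cur [] = [] := PySem.Dict.getD_of_not_contains tm [] (by simpa using hc)
        have hmono := pv_filter_le p q himp tm.keys
        have hmul : K * (tm.keys.filter q).length ≤ K * (tm.keys.filter p).length :=
          Nat.mul_le_mul_left K hmono
        simp only [this, List.append_nil, List.length_nil] at hlen ⊢
        omega

-- A's second loop over baseStr, carrying output and the (drained) stack.
def pvOuterA (tm : PySem.Dict Char (List Char)) : List Char → String → List Char → String
  | [], output, _stack => output
  | c :: cs, output, stack =>
    let stack1 := if tm.contains c then stack ++ tm.getD c [] else stack
    let r := pvLoopA tm stack1 (PySem.Set.add PySem.Set.empty c) c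
    pvOuterA tm cs (output.push r.1) r.2

def smallestEquivalentStringNotSoIdeal (s1 : String) (s2 : String) (baseStr : String) : String :=
  pvOuterA (pvBuildTM s1 s2) baseStr.toList "" []

-- ===== PORT B =====

-- `while c in parent: c = parent[c]` — every stored parent is strictly smaller than
-- its key, so the chain length is below 1114112 (the number of chars) and the fuel
-- never runs out.
def pvFindR (p : PySem.Dict Char Char) : Nat → Char → Char
  | 0, c => c
  | fuel + 1, c =>
    match p.get? c with
    | none => c
    | some v => pvFindR p fuel v

def pvFind (p : PySem.Dict Char Char) (c : Char) : Char := pvFindR p 1114112 c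

-- the body of B's `for a, b in zip(s1, s2)` loop
def pvUnionStep (p : PySem.Dict Char Char) (e : Char × Char) : PySem.Dict Char Char :=
  let ra := pvFind p e.1
  let rb := pvFind p e.2
  if ra = rb then p
  else if rb < ra then p.insert ra rb
  else p.insert rb ra

def smallestEquivalentStringNotSoIdeal_alt (s1 : String) (s2 : String) (baseStr : String) : String :=
  let parent := (s1.toList.zip s2.toList).foldl pvUnionStep PySem.Dict.empty
  String.ofList (baseStr.toList.map (fun c => pvFind parent c))

-- ===== PRECONDITION & SPEC =====

-- Pre_ excludes exactly the inputs with len(s1) > len(s2), on which A raises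
-- IndexError at s2[i].
def Pre_smallestEquivalentStringNotSoIdeal (s1 : String) (s2 : String) (baseStr : String) : Prop :=
  s1.toList.length ≤ s2.toList.length
instance (s1 : String) (s2 : String) (baseStr : String) : Decidable (Pre_smallestEquivalentStringNotSoIdeal s1 s2 baseStr) := by unfold Pre_smallestEquivalentStringNotSoIdeal; infer_instance

def pvWitness_smallestEquivalentStringNotSoIdeal : String × String × String := ("ab", "ba", "abc")

def Spec_smallestEquivalentStringNotSoIdeal (s1 : String) (s2 : String) (baseStr : String) (out : String) : Prop := out = smallestEquivalentStringNotSoIdeal_alt s1 s2 baseStr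
instance (s1 : String) (s2 : String) (baseStr : String) (out : String) : Decidable (Spec_smallestEquivalentStringNotSoIdeal s1 s2 baseStr out) := by unfold Spec_smallestEquivalentStringNotSoIdeal; infer_instance

-- ===== CLAIM (what is proved, stated in full; the proofs are below) =====
def Claim_equal_smallestEquivalentStringNotSoIdeal : Prop := ∀ (s1 : String) (s2 : String) (baseStr : String), Dom_smallestEquivalentStringNotSoIdeal s1 s2 baseStr → Pre_smallestEquivalentStringNotSoIdeal s1 s2 baseStr → Spec_smallestEquivalentStringNotSoIdeal s1 s2 baseStr (smallestEquivalentStringNotSoIdeal s1 s2 baseStr)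

-- ===== LEMMAS AND PROOFS =====

def pvE (ps : List (Char × Char)) (a b : Char) : Prop := (a, b) ∈ ps ∨ (b, a) ∈ ps
def pvReach (ps : List (Char × Char)) : Char → Char → Prop := Relation.ReflTransGen (pvE ps)

theorem pv_loopA_spec (tm : PySem.Dict Char (List Char)) (ps : List (Char × Char))
    (htm : ∀ a b, b ∈ tm.getD a [] ↔ pvE ps a b) (c : Char) :
    ∀ (stack : List Char) (visited : PySem.Set Char) (small : Char),
      (∀ v ∈ visited, pvReach ps c v) →
      (∀ x ∈ stack, pvReach ps c x) →
      c ∈ visited →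
      small ∈ visited →
      (∀ v ∈ visited, small ≤ v) →
      (∀ v ∈ visited, ∀ w, pvE ps v w → w ∈ visited ∨ w ∈ stack) →
      pvReach ps c (pvLoopA tm stack visited small).1 ∧
      (∀ d, pvReach ps c d → (pvLoopA tm stack visited small).1 ≤ d) := by
  intro stack visited small
  induction stack, visited, small using pvLoopA.induct tm with
  | case1 stack visited small h =>
    intro h1 _h2 h3 h4 h5 h6
    have hstack : stack = [] := List.getLast?_eq_none_iff.mp h
    subst hstack
    rw [pvLoopA]
    have hclosed : ∀ v ∈ visited, ∀ w, pvE ps v w → w ∈ visited := by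
      intro v hv w hw
      rcases h6 v hv w hw with hin | hin
      · exact hin
      · simp at hin
    have hvis : ∀ d, pvReach ps c d → d ∈ visited := by
      intro d hd
      induction hd with
      | refl => exact h3
      | tail _ he ih => exact hclosed _ ih _ he
    exact ⟨h1 small h4, fun d hd => h5 d (hvis d hd)⟩
  | case2 stack visited small cur h _rest hvc ih =>
    intro h1 h2 h3 h4 h5 h6
    have hne : stack ≠ [] := by intro hs; rw [hs] at h; simp at h
    have hcur : cur = stack.getLast hne := by
      have := List.getLast?_eq_some_getLast (l := stack) hne
      rw [h] at this; exact (Option.some_inj.mp this)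
    have hsplit : stack.dropLast ++ [cur] = stack := by
      rw [hcur]; exact List.dropLast_concat_getLast hne
    have hcurv : cur ∈ visited := by simpa [PySem.Set.contains] using hvc
    rw [pvLoopA, h]
    simp only [hvc, if_true]
    apply ih h1
    · intro x hx; exact h2 x (by rw [← hsplit]; exact List.mem_append_left _ hx)
    · exact h3
    · exact h4
    · exact h5
    · intro v hv w hw
      rcases h6 v hv w hw with hin | hin
      · exact Or.inl hin
      · rw [← hsplit] at hin
        rcases List.mem_append.mp hin with hin | hin
        · exact Or.inr hin
        · simp at hin; subst hin; exact Or.inl hcurv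
  | case3 stack visited small cur h _rest hvc ih =>
    intro h1 h2 h3 h4 h5 h6
    have hne : stack ≠ [] := by intro hs; rw [hs] at h; simp at h
    have hcur : cur = stack.getLast hne := by
      have := List.getLast?_eq_some_getLast (l := stack) hne
      rw [h] at this; exact (Option.some_inj.mp this)
    have hsplit : stack.dropLast ++ [cur] = stack := by
      rw [hcur]; exact List.dropLast_concat_getLast hne
    have hcurstack : cur ∈ stack := by rw [← hsplit]; exact List.mem_append_right _ (by simp)
    have hrc : pvReach ps c cur := h2 cur hcurstack
    rw [pvLoopA, h]
    simp only [hvc]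
    apply ih
    · intro v hv
      rcases (PySem.Set.mem_add _ _ _).mp hv with hv | hv
      · exact h1 v hv
      · subst hv; exact hrc
    · intro x hx
      rcases List.mem_append.mp hx with hx | hx
      · exact h2 x (by rw [← hsplit]; exact List.mem_append_left _ hx)
      · exact Relation.ReflTransGen.tail hrc ((htm cur x).mp hx)
    · exact (PySem.Set.mem_add _ _ _).mpr (Or.inl h3)
    · split
      · exact (PySem.Set.mem_add _ _ _).mpr (Or.inr rfl)
      · exact (PySem.Set.mem_add _ _ _).mpr (Or.inl h4)
    · intro v hv
      rcases (PySem.Set.mem_add _ _ _).mp hv with hv | hv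
      · split
        · rename_i hlt; exact le_of_lt (lt_of_lt_of_le hlt (h5 v hv))
        · exact h5 v hv
      · subst hv
        split
        · exact le_rfl
        · rename_i hlt; exact le_of_not_gt hlt
    · intro v hv w hw
      rcases (PySem.Set.mem_add _ _ _).mp hv with hv | hv
      · rcases h6 v hv w hw with hin | hin
        · exact Or.inl ((PySem.Set.mem_add _ _ _).mpr (Or.inl hin))
        · rw [← hsplit] at hin
          rcases List.mem_append.mp hin with hin | hin
          · exact Or.inr (List.mem_append_left _ hin)
          · simp at hin; subst hin
            exact Or.inl ((PySem.Set.mem_add _ _ _).mpr (Or.inr rfl))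
      · subst hv
        exact Or.inr (List.mem_append_right _ ((htm v w).mpr hw))

theorem pv_loopA_snd (tm : PySem.Dict Char (List Char)) :
    ∀ (stack : List Char) (visited : PySem.Set Char) (small : Char),
      (pvLoopA tm stack visited small).2 = [] := by
  intro stack visited small
  induction stack, visited, small using pvLoopA.induct tm with
  | case1 stack visited small h =>
    rw [pvLoopA, h]
    exact List.getLast?_eq_none_iff.mp h
  | case2 stack visited small cur h _rest hvc ih =>
    rw [pvLoopA, h]; simp only [hvc, if_true]; exact ih
  | case3 stack visited small cur h _rest hvc ih =>
    rw [pvLoopA, h]; simp only [hvc]; exact ih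

def pvAChar (tm : PySem.Dict Char (List Char)) (c : Char) : Char :=
  (pvLoopA tm (tm.getD c []) (PySem.Set.add PySem.Set.empty c) c).1

theorem pv_aChar_isMin (tm : PySem.Dict Char (List Char)) (ps : List (Char × Char))
    (htm : ∀ a b, b ∈ tm.getD a [] ↔ pvE ps a b) (c : Char) :
    pvReach ps c (pvAChar tm c) ∧ ∀ d, pvReach ps c d → pvAChar tm c ≤ d := by
  have hone : ∀ x : Char, x ∈ PySem.Set.add PySem.Set.empty c ↔ x = c := by
    intro x
    rw [PySem.Set.mem_add]
    simp [PySem.Set.empty]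
  apply pv_loopA_spec tm ps htm c
  · intro v hv; rw [hone] at hv; subst hv; exact Relation.ReflTransGen.refl
  · intro x hx; exact Relation.ReflTransGen.single ((htm c x).mp hx)
  · exact (hone c).mpr rfl
  · exact (hone c).mpr rfl
  · intro v hv; rw [hone] at hv; subst hv; exact le_rfl
  · intro v hv w hw; rw [hone] at hv; subst hv
    exact Or.inr ((htm v w).mpr hw)

theorem pv_outerA_toList (tm : PySem.Dict Char (List Char)) :
    ∀ (cs : List Char) (output : String),
      (pvOuterA tm cs output []).toList = output.toList ++ cs.map (pvAChar tm) := by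
  intro cs
  induction cs with
  | nil => intro output; simp [pvOuterA]
  | cons c cs ih =>
    intro output
    have hstack : (if tm.contains c then ([] : List Char) ++ tm.getD c [] else []) = tm.getD c [] := by
      by_cases hc : tm.contains c
      · simp [hc]
      · simp [hc, PySem.Dict.getD_of_not_contains tm [] (by simpa using hc)]
    rw [pvOuterA]
    simp only [hstack, pv_loopA_snd, ih, String.toList_push]
    simp [pvAChar]

theorem pv_mem_tmStep (tm : PySem.Dict Char (List Char)) (x y a b : Char) :
    b ∈ (pvTMStep tm (x, y)).getD a [] ↔
      b ∈ tm.getD a [] ∨ (a = x ∧ b = y) ∨ (a = y ∧ b = x) := by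
  unfold pvTMStep
  simp only [PySem.Dict.getD_insert]
  split_ifs <;> subst_vars <;> aesop

theorem pv_mem_zipfold (ps : List (Char × Char)) (a b : Char) :
    b ∈ (ps.foldl pvTMStep PySem.Dict.empty).getD a [] ↔ pvE ps a b := by
  suffices hgen : ∀ tm : PySem.Dict Char (List Char),
      b ∈ (ps.foldl pvTMStep tm).getD a [] ↔ b ∈ tm.getD a [] ∨ pvE ps a b by
    rw [hgen]
    simp [PySem.Dict.getD_empty]
  induction ps with
  | nil => intro tm; simp [pvE]
  | cons e t ih =>
    obtain ⟨x, y⟩ := e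
    intro tm
    rw [List.foldl_cons, ih, pv_mem_tmStep tm x y a b]
    unfold pvE
    simp only [List.mem_cons, Prod.mk.injEq]
    tauto

theorem pv_foldl_idx {β : Type} (l1 : List Char) :
    ∀ (l2 : List Char), l1.length ≤ l2.length → ∀ (f : β → Char × Char → β) (init : β),
    (List.range l1.length).foldl
      (fun acc (k : Nat) =>
        match PySem.List.pyGet? l1 (k : Int), PySem.List.pyGet? l2 (k : Int) with
        | some c1, some c2 => f acc (c1, c2)
        | _, _ => acc) init
    = (l1.zip l2).foldl f init := by
  induction l1 with
  | nil => intro l2 _ f init; simp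
  | cons a t ih =>
    intro l2 hlen f init
    cases l2 with
    | nil => simp at hlen
    | cons c u =>
      rw [List.length_cons, List.range_succ_eq_map, List.foldl_cons, List.foldl_map,
        List.zip_cons_cons, List.foldl_cons]
      have h0 : ∀ (v : Char) (vs : List Char), PySem.List.pyGet? (v :: vs) ((0 : Nat) : Int) = some v := by
        intro v vs; rw [PySem.List.pyGet?_natCast]; rfl
      rw [h0, h0]
      rw [← ih u (by simpa using hlen) f (f init (a, c))]
      apply PySem.List.foldl_congr_mem
      intro acc k _
      rw [show ((Nat.succ k : Nat) : Int) = ((k + 1 : Nat) : Int) by rfl]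
      rw [PySem.List.pyGet?_natCast, PySem.List.pyGet?_natCast,
        PySem.List.pyGet?_natCast, PySem.List.pyGet?_natCast]
      simp

theorem pv_buildTM_eq (s1 s2 : String) (h : s1.toList.length ≤ s2.toList.length) :
    pvBuildTM s1 s2 = (s1.toList.zip s2.toList).foldl pvTMStep PySem.Dict.empty := by
  unfold pvBuildTM
  have hlen : PySem.Str.len s1 = (s1.toList.length : Int) := by
    simp [PySem.Str.len_eq]
  rw [hlen, PySem.List.pyRange_zero_natCast, List.foldl_map]
  rw [← pv_foldl_idx s1.toList s2.toList h pvTMStep PySem.Dict.empty]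
  apply PySem.List.foldl_congr_mem
  intro acc k _
  simp only [PySem.Str.pyGet?_eq, PySem.Chars.pyGet?_eq_listPyGet?]

theorem pv_findR_succ (p : PySem.Dict Char Char) (f : Nat) (c : Char) :
    pvFindR p (f + 1) c = match p.get? c with | none => c | some v => pvFindR p f v := rfl

def pvP1 (p : PySem.Dict Char Char) : Prop := ∀ k v, p.get? k = some v → v < k

theorem pv_char_lt_limit (c : Char) : c.toNat < 1114112 := by
  have h := c.valid
  simp [UInt32.isValidChar, Nat.isValidChar] at h
  have : c.toNat = c.val.toNat := rfl
  omega

theorem pv_char_lt_toNat {a b : Char} (h : a < b) : a.toNat < b.toNat := h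

theorem pv_findR_congr (p : PySem.Dict Char Char) (hp : pvP1 p) :
    ∀ (n : Nat) (c : Char), c.toNat ≤ n → ∀ (f f' : Nat), c.toNat < f → c.toNat < f' →
      pvFindR p f c = pvFindR p f' c := by
  intro n
  induction n with
  | zero =>
    intro c hc f f' hf hf'
    obtain ⟨a, rfl⟩ := (⟨f - 1, by omega⟩ : ∃ a, f = a + 1)
    obtain ⟨b, rfl⟩ := (⟨f' - 1, by omega⟩ : ∃ b, f' = b + 1)
    cases hv : p.get? c with
    | none => rw [pv_findR_succ, pv_findR_succ, hv]
    | some v =>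
      have := pv_char_lt_toNat (hp c v hv)
      omega
  | succ n ih =>
    intro c hc f f' hf hf'
    obtain ⟨a, rfl⟩ := (⟨f - 1, by omega⟩ : ∃ a, f = a + 1)
    obtain ⟨b, rfl⟩ := (⟨f' - 1, by omega⟩ : ∃ b, f' = b + 1)
    cases hv : p.get? c with
    | none => rw [pv_findR_succ, pv_findR_succ, hv]
    | some v =>
      have hvlt := pv_char_lt_toNat (hp c v hv)
      rw [pv_findR_succ, pv_findR_succ, hv]
      exact ih v (by omega) a b (by omega) (by omega)

theorem pv_find_root (p : PySem.Dict Char Char) {c : Char} (h : p.get? c = none) :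
    pvFind p c = c := by
  show pvFindR p (1114111 + 1) c = c
  rw [pv_findR_succ, h]

theorem pv_find_step (p : PySem.Dict Char Char) (hp : pvP1 p) {c v : Char}
    (hv : p.get? c = some v) : pvFind p c = pvFind p v := by
  have hc := pv_char_lt_limit c
  have hvlt := pv_char_lt_toNat (hp c v hv)
  have h1 : pvFind p c = pvFindR p 1114111 v := by
    show pvFindR p (1114111 + 1) c = _
    rw [pv_findR_succ, hv]
  rw [h1]
  exact pv_findR_congr p hp v.toNat v le_rfl 1114111 1114112 (by omega) (by omega)

theorem pv_find_isRoot (p : PySem.Dict Char Char) (hp : pvP1 p) :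
    ∀ (n : Nat) (c : Char), c.toNat ≤ n → p.get? (pvFind p c) = none := by
  intro n
  induction n with
  | zero =>
    intro c hc
    cases hv : p.get? c with
    | none => rwa [pv_find_root p hv]
    | some v => have := pv_char_lt_toNat (hp c v hv); omega
  | succ n ih =>
    intro c hc
    cases hv : p.get? c with
    | none => rwa [pv_find_root p hv]
    | some v =>
      rw [pv_find_step p hp hv]
      exact ih v (by have := pv_char_lt_toNat (hp c v hv); omega)

theorem pv_find_empty (c : Char) : pvFind PySem.Dict.empty c = c :=
  pv_find_root _ (PySem.Dict.get?_empty c)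

theorem pv_p1_empty : pvP1 (PySem.Dict.empty : PySem.Dict Char Char) := by
  intro k v hv; rw [PySem.Dict.get?_empty] at hv; cases hv

theorem pv_p1_insert (p : PySem.Dict Char Char) (hp : pvP1 p) {ra rb : Char}
    (hlt : rb < ra) : pvP1 (p.insert ra rb) := by
  intro k v hv
  rw [PySem.Dict.get?_insert] at hv
  split at hv
  · rename_i hk; cases hv; rw [hk]; exact hlt
  · exact hp k v hv

theorem pv_find_insert (p : PySem.Dict Char Char) (hp : pvP1 p) {ra rb : Char}
    (hra : p.get? ra = none) (hrb : p.get? rb = none) (hlt : rb < ra) :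
    ∀ (n : Nat) (c : Char), c.toNat ≤ n →
      pvFind (p.insert ra rb) c = if pvFind p c = ra then rb else pvFind p c := by
  have hp' : pvP1 (p.insert ra rb) := pv_p1_insert p hp hlt
  have hne : rb ≠ ra := ne_of_lt hlt
  have hrb' : (p.insert ra rb).get? rb = none := by
    rw [PySem.Dict.get?_insert, if_neg hne]; exact hrb
  intro n
  induction n with
  | zero =>
    intro c hc
    cases hv : p.get? c with
    | none =>
      by_cases hcra : c = ra
      · subst hcra
        rw [pv_find_root p hra, if_pos rfl]
        have : (p.insert c rb).get? c = some rb := PySem.Dict.get?_insert_self p c rb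
        rw [pv_find_step _ hp' this, pv_find_root _ hrb']
      · rw [pv_find_root p hv, if_neg hcra, pv_find_root _ (by rw [PySem.Dict.get?_insert, if_neg hcra]; exact hv)]
    | some v => have := pv_char_lt_toNat (hp c v hv); omega
  | succ n ih =>
    intro c hc
    cases hv : p.get? c with
    | none =>
      by_cases hcra : c = ra
      · subst hcra
        rw [pv_find_root p hra, if_pos rfl]
        have : (p.insert c rb).get? c = some rb := PySem.Dict.get?_insert_self p c rb
        rw [pv_find_step _ hp' this, pv_find_root _ hrb']
      · rw [pv_find_root p hv, if_neg hcra, pv_find_root _ (by rw [PySem.Dict.get?_insert, if_neg hcra]; exact hv)]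
    | some v =>
      have hvlt := pv_char_lt_toNat (hp c v hv)
      have hcra : c ≠ ra := by intro hcr; subst hcr; rw [hra] at hv; cases hv
      have hv' : (p.insert ra rb).get? c = some v := by
        rw [PySem.Dict.get?_insert, if_neg hcra]; exact hv
      rw [pv_find_step _ hp' hv', pv_find_step p hp hv]
      exact ih v (by omega)

def pvJoin (R : Char → Char → Prop) (a b c d : Char) : Prop :=
  R c d ∨ (R c a ∧ R b d) ∨ (R c b ∧ R a d)

theorem pv_join_equiv {R : Char → Char → Prop} (hR : Equivalence R) (a b : Char) :
    Equivalence (pvJoin R a b) := by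
  constructor
  · intro x; exact Or.inl (hR.refl x)
  · intro x y h
    rcases h with h | ⟨h1, h2⟩ | ⟨h1, h2⟩
    · exact Or.inl (hR.symm h)
    · exact Or.inr (Or.inr ⟨hR.symm h2, hR.symm h1⟩)
    · exact Or.inr (Or.inl ⟨hR.symm h2, hR.symm h1⟩)
  · intro x y z h g
    rcases h with h | ⟨h1, h2⟩ | ⟨h1, h2⟩ <;> rcases g with g | ⟨g1, g2⟩ | ⟨g1, g2⟩
    · exact Or.inl (hR.trans h g)
    · exact Or.inr (Or.inl ⟨hR.trans h g1, g2⟩)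
    · exact Or.inr (Or.inr ⟨hR.trans h g1, g2⟩)
    · exact Or.inr (Or.inl ⟨h1, hR.trans h2 g⟩)
    · exact Or.inl (hR.trans (hR.trans h1 (hR.symm (hR.trans h2 g1))) g2)
    · exact Or.inl (hR.trans h1 g2)
    · exact Or.inr (Or.inr ⟨h1, hR.trans h2 g⟩)
    · exact Or.inl (hR.trans h1 g2)
    · exact Or.inr (Or.inr ⟨h1, g2⟩)
  
def pvDInv (p : PySem.Dict Char Char) (R : Char → Char → Prop) : Prop :=
  Equivalence R ∧ pvP1 p ∧ (∀ c, R c (pvFind p c)) ∧ (∀ c d, R c d → pvFind p c ≤ d)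

theorem pv_dinv_find_congr {p : PySem.Dict Char Char} {R : Char → Char → Prop}
    (h : pvDInv p R) {c d : Char} (hcd : R c d) : pvFind p c = pvFind p d := by
  obtain ⟨hR, _, hmem, hmin⟩ := h
  apply le_antisymm
  · exact hmin c _ (hR.trans hcd (hmem d))
  · exact hmin d _ (hR.trans (hR.symm hcd) (hmem c))

theorem pv_dinv_congrR {p : PySem.Dict Char Char} {R R' : Char → Char → Prop}
    (h : pvDInv p R) (hiff : ∀ c d, R c d ↔ R' c d) : pvDInv p R' := by
  obtain ⟨hR, hp, hmem, hmin⟩ := h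
  refine ⟨⟨fun x => (hiff x x).mp (hR.refl x),
          fun hxy => (hiff _ _).mp (hR.symm ((hiff _ _).mpr hxy)),
          fun hxy hyz => (hiff _ _).mp (hR.trans ((hiff _ _).mpr hxy) ((hiff _ _).mpr hyz))⟩,
        hp, fun c => (hiff _ _).mp (hmem c), fun c d hcd => hmin c d ((hiff _ _).mpr hcd)⟩

theorem pv_dinv_insert {p : PySem.Dict Char Char} {R : Char → Char → Prop}
    (h : pvDInv p R) (a b : Char) (hlt : pvFind p b < pvFind p a) :
    pvDInv (p.insert (pvFind p a) (pvFind p b)) (pvJoin R a b) := by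
  obtain ⟨hR, hp, hmem, hmin⟩ := h
  set ra := pvFind p a with hraeq
  set rb := pvFind p b with hrbeq
  have hra : p.get? ra = none := pv_find_isRoot p hp a.toNat a le_rfl
  have hrb : p.get? rb = none := pv_find_isRoot p hp b.toNat b le_rfl
  have hp' : pvP1 (p.insert ra rb) := pv_p1_insert p hp hlt
  have hfind : ∀ c, pvFind (p.insert ra rb) c = if pvFind p c = ra then rb else pvFind p c :=
    fun c => pv_find_insert p hp hra hrb hlt c.toNat c le_rfl
  have hcongr : ∀ {c d : Char}, R c d → pvFind p c = pvFind p d :=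
    fun hcd => pv_dinv_find_congr ⟨hR, hp, hmem, hmin⟩ hcd
  refine ⟨pv_join_equiv hR a b, hp', ?_, ?_⟩
  · intro c
    rw [hfind c]
    split
    · rename_i hcr
      have hca : R c a := hR.trans (hmem c) (hcr ▸ (hR.symm (hmem a)))
      exact Or.inr (Or.inl ⟨hca, hmem b⟩)
    · exact Or.inl (hmem c)
  · intro c d hcd
    rw [hfind c]
    rcases hcd with hcd | ⟨h1, h2⟩ | ⟨h1, h2⟩
    · split
      · rename_i hcr
        exact le_trans (le_of_lt hlt) (hcr ▸ hmin c d hcd)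
      · exact hmin c d hcd
    · have hfc : pvFind p c = ra := hraeq ▸ hcongr h1
      rw [if_pos hfc]
      exact hrbeq ▸ hmin b d h2
    · have hfc : pvFind p c = rb := hrbeq ▸ hcongr h1
      rw [if_neg (by rw [hfc]; exact ne_of_lt hlt)]
      rw [hfc]
      exact le_trans (le_of_lt hlt) (hraeq ▸ hmin a d h2)

theorem pv_dinv_unionStep {p : PySem.Dict Char Char} {R : Char → Char → Prop}
    (h : pvDInv p R) (e : Char × Char) :
    pvDInv (pvUnionStep p e) (pvJoin R e.1 e.2) := by
  obtain ⟨x, y⟩ := e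
  unfold pvUnionStep
  simp only
  split
  · rename_i heq
    obtain ⟨hR, hp, hmem, hmin⟩ := h
    refine ⟨pv_join_equiv hR x y, hp, fun c => Or.inl (hmem c), ?_⟩
    intro c d hcd
    rcases hcd with hcd | ⟨h1, h2⟩ | ⟨h1, h2⟩
    · exact hmin c d hcd
    · rw [pv_dinv_find_congr ⟨hR, hp, hmem, hmin⟩ h1, heq]
      exact hmin y d h2
    · rw [pv_dinv_find_congr ⟨hR, hp, hmem, hmin⟩ h1, ← heq]
      exact hmin x d h2
  · rename_i hne
    split
    · rename_i hlt
      exact pv_dinv_insert h x y hlt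
    · rename_i hnlt
      have hlt : pvFind p x < pvFind p y := lt_of_le_of_ne (le_of_not_gt hnlt) hne
      have := pv_dinv_insert h y x hlt
      exact pv_dinv_congrR this (by intro c d; unfold pvJoin; tauto)

def pvRelP (ps : List (Char × Char)) : Char → Char → Prop :=
  Relation.EqvGen (fun x y : Char => (x, y) ∈ ps)

theorem pv_relP_nil {c d : Char} : pvRelP [] c d ↔ c = d := by
  constructor
  · intro h
    induction h with
    | rel _ _ hxy => simp at hxy
    | refl => rfl
    | symm _ _ _ ih => exact ih.symm
    | trans _ _ _ _ _ ih1 ih2 => exact ih1.trans ih2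
  · rintro rfl; exact Relation.EqvGen.refl c

theorem pv_relP_append (ps : List (Char × Char)) (a b : Char) :
    ∀ c d, pvRelP (ps ++ [(a, b)]) c d ↔ pvJoin (pvRelP ps) a b c d := by
  have hequiv : Equivalence (pvRelP ps) := Relation.EqvGen.is_equivalence _
  have hjoin := pv_join_equiv hequiv a b
  intro c d
  constructor
  · intro h
    induction h with
    | rel x y hxy =>
      rcases List.mem_append.mp hxy with hin | hin
      · exact Or.inl (Relation.EqvGen.rel x y hin)
      · simp only [List.mem_singleton, Prod.mk.injEq] at hin
        obtain ⟨rfl, rfl⟩ := hin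
        exact Or.inr (Or.inl ⟨hequiv.refl x, hequiv.refl y⟩)
    | refl => exact hjoin.refl _
    | symm _ _ _ ih => exact hjoin.symm ih
    | trans _ _ _ _ _ ih1 ih2 => exact hjoin.trans ih1 ih2
  · intro h
    have hmono : ∀ {u v : Char}, pvRelP ps u v → pvRelP (ps ++ [(a, b)]) u v :=
      fun huv => Relation.EqvGen.mono (fun x y hxy => List.mem_append_left _ hxy) huv
    have hab : pvRelP (ps ++ [(a, b)]) a b :=
      Relation.EqvGen.rel a b (List.mem_append_right _ (by simp))
    have htrans := (Relation.EqvGen.is_equivalence (α := Char) (fun x y : Char => (x, y) ∈ ps ++ [(a, b)]))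
    rcases h with h | ⟨h1, h2⟩ | ⟨h1, h2⟩
    · exact hmono h
    · exact htrans.trans (htrans.trans (hmono h1) hab) (hmono h2)
    · exact htrans.trans (htrans.trans (hmono h1) (htrans.symm hab)) (hmono h2)

theorem pv_dinv_foldl (ps : List (Char × Char)) :
    pvDInv (ps.foldl pvUnionStep PySem.Dict.empty) (pvRelP ps) := by
  induction ps using List.reverseRecOn with
  | nil =>
    rw [List.foldl_nil]
    refine ⟨Relation.EqvGen.is_equivalence _, pv_p1_empty, ?_, ?_⟩
    · intro c; rw [pv_find_empty]; exact Relation.EqvGen.refl c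
    · intro c d hcd
      rw [pv_find_empty, pv_relP_nil.mp hcd]
  | append_singleton ps e ih =>
    rw [List.foldl_append, List.foldl_cons, List.foldl_nil]
    have := pv_dinv_unionStep ih e
    exact pv_dinv_congrR this (fun c d => (pv_relP_append ps e.1 e.2 c d).symm)

theorem pv_reach_iff_relP (ps : List (Char × Char)) (c d : Char) :
    pvReach ps c d ↔ pvRelP ps c d := by
  constructor
  · intro h
    induction h with
    | refl => exact Relation.EqvGen.refl c
    | tail _ he ih =>
      rcases he with he | he
      · exact Relation.EqvGen.trans _ _ _ ih (Relation.EqvGen.rel _ _ he)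
      · exact Relation.EqvGen.trans _ _ _ ih (Relation.EqvGen.symm _ _ (Relation.EqvGen.rel _ _ he))
  · intro h
    have hsym : Symmetric (pvE ps) := fun x y hxy => hxy.elim Or.inr Or.inl
    induction h with
    | rel x y hxy => exact Relation.ReflTransGen.single (Or.inl hxy)
    | refl => exact Relation.ReflTransGen.refl
    | symm x y _ ih => exact (Relation.ReflTransGen.symmetric hsym) ih
    | trans _ _ _ _ _ ih1 ih2 => exact Relation.ReflTransGen.trans ih1 ih2

theorem pv_char_eq (tm : PySem.Dict Char (List Char)) (ps : List (Char × Char))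
    (parent : PySem.Dict Char Char)
    (htm : ∀ a b, b ∈ tm.getD a [] ↔ pvE ps a b)
    (hdinv : pvDInv parent (pvRelP ps)) (c : Char) :
    pvAChar tm c = pvFind parent c := by
  obtain ⟨hA1, hA2⟩ := pv_aChar_isMin tm ps htm c
  obtain ⟨hR, hp, hmem, hmin⟩ := hdinv
  apply le_antisymm
  · exact hA2 _ ((pv_reach_iff_relP ps c _).mpr (hmem c))
  · exact hmin c _ ((pv_reach_iff_relP ps c _).mp hA1)

theorem pv_main : ∀ (s1 s2 baseStr : String), s1.toList.length ≤ s2.toList.length →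
    smallestEquivalentStringNotSoIdeal s1 s2 baseStr
      = smallestEquivalentStringNotSoIdeal_alt s1 s2 baseStr := by
  intro s1 s2 baseStr hpre
  unfold smallestEquivalentStringNotSoIdeal smallestEquivalentStringNotSoIdeal_alt
  simp only
  set ps := s1.toList.zip s2.toList with hps
  set tm := pvBuildTM s1 s2 with htmeq
  set parent := ps.foldl pvUnionStep PySem.Dict.empty with hparent
  have htm : ∀ a b, b ∈ tm.getD a [] ↔ pvE ps a b := by
    intro a b
    rw [htmeq, pv_buildTM_eq s1 s2 hpre]
    exact pv_mem_zipfold ps a b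
  apply String.toList_inj.mp
  rw [pv_outerA_toList]
  simp only [String.toList_ofList, String.toList_empty, List.nil_append]
  exact List.map_congr_left (fun c _ => pv_char_eq tm ps parent htm (pv_dinv_foldl ps) c)


-- ===== VERDICT (by name: the statement is the Claim_ definition above) =====
theorem smallestEquivalentStringNotSoIdeal_spec : Claim_equal_smallestEquivalentStringNotSoIdeal := by
  intro s1 s2 baseStr _hdom hpre
  exact pv_main s1 s2 baseStr hpre
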